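-- pv_equiv track=rewrite | github.com/kmurphy/Lattice_Paths | paths/dyck.py | generate
-- ===== SOURCE A (Python) =====
-- def generate(n, return_type='str'):
--     """Generate paths of length n."""
--
--     stack = [(0, 0, 0, "")]  # (length, height, up count, path)
--
--     while stack:
--         length, height, up, path = stack.pop()
--
--         if length == 2 * n:
--             yield list(path) if return_type=='list' else path
--             continue
--
--         if height>0:
--             stack.append((length+1, height-1, up, path + "D"))
--
--         if up < n:
--             stack.append((length + 1, height+1, up+1, path + "U"))
-- ===== SOURCE B (Python) =====
-- def _next_path(path):
--     """Lexicographically next Dyck word after path (with U < D), or None."""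
--     su = sd = 0          # U's / D's seen in the scanned suffix
--     k = len(path)        # start of the scanned suffix
--     for c in reversed(path):
--         k -= 1
--         if c == 'U':
--             su += 1
--             if sd - su >= 1:   # prefix height stays >= 1 before the flipped position
--                 return path[:k] + ['D'] + ['U'] * su + ['D'] * (sd - 1)
--         else:
--             sd += 1
--     return None
--
--
-- def generate(n, return_type='str'):
--     """Generate paths of length n."""
--     if n < 0:
--         return
--     path = ['U'] * n + ['D'] * n
--     while path is not None:
--         s = ''.join(path)
--         yield list(s) if return_type == 'list' else s
--         path = _next_path(path)
-- ===== Notes on version B (the rewrite author's own statement) =====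
-- stated objective: alternative
-- what changed: Replaced A's depth-first explicit-LIFO-stack search by lexicographic-successor iteration: start from U^n D^n and repeatedly flip the rightmost U whose prefix height allows a D, refilling the tail greedily — O(n) state instead of a stack of partial paths, same output order.
-- outside the precondition, e.g. on generate(1, 'list'): A returns [['U', 'D']], B returns [['U', 'D']]
import Mathlib
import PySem

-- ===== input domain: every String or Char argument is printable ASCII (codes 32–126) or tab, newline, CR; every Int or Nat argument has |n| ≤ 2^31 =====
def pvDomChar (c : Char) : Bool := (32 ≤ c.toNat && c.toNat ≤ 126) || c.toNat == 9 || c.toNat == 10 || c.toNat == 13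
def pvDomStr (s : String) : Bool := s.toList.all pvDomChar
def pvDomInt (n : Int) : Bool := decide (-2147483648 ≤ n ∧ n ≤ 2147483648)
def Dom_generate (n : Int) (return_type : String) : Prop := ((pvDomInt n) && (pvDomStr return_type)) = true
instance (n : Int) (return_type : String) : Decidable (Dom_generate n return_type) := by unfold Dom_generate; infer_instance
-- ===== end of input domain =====

-- B replaces A's depth-first explicit-stack search by lexicographic-successor iteration:
-- start from U^n D^n and repeatedly flip the rightmost flippable U, refilling greedily
-- (O(n) state instead of a stack of partial paths): objective 'alternative'.

-- ===== PORT A =====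
-- fuel bound for a single stack state: each loop step strictly decreases 2*(n-up)⁺ + height⁺,
-- so 3^that bounds the iterations a state can cause (the fuel is a totality guard only)
def pvExp (n height up : Int) : Nat := 2 * (n - up).toNat + height.toNat

def pvM (n : Int) (st : Int × Int × Int × String) : Nat := 3 ^ pvExp n st.2.1 st.2.2.1

def pvMS (n : Int) (stack : List (Int × Int × Int × String)) : Nat := (stack.map (pvM n)).sum

-- A's while-loop over the explicit stack (head of the list = top of the Python stack;
-- Python appends the D-state first, then the U-state, so U is on top)
def pvLoopA (n : Int) (return_type : String) :
    Nat → List (Int × Int × Int × String) → List String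
  | _, [] => []
  | 0, _ :: _ => []  -- fuel exhausted: unreachable from generate's initial fuel (proved below)
  | fuel + 1, (length, height, up, path) :: rest =>
    if length == 2 * n then
      -- 'yield list(path) if return_type=="list" else path': the "list" case yields a
      -- list of chars (not a String value) and is excluded by Pre_generate
      path :: pvLoopA n return_type fuel rest
    else
      pvLoopA n return_type fuel
        ((if up < n then [(length + 1, height + 1, up + 1, path ++ "U")] else []) ++
         (if height > 0 then [(length + 1, height - 1, up, path ++ "D")] else []) ++ rest)

def generate (n : Int) (return_type : String) : List String :=
  pvLoopA n return_type (pvMS n [(0, 0, 0, "")]) [(0, 0, 0, "")]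

-- ===== PORT B =====
-- Source B's _next_path scan: the first list is the not-yet-scanned part of reversed(path),
-- su/sd count the U's/D's already scanned; python's path[:k] is the reverse of the rest
def pvFindNext : List Char → Nat → Nat → Option (List Char)
  | [], _, _ => none
  | c :: r, su, sd =>
    if c == 'U' then
      if su + 2 ≤ sd then  -- python's 'sd - su >= 1' after its 'su += 1'
        some (r.reverse ++ 'D' :: (List.replicate (su + 1) 'U' ++ List.replicate (sd - 1) 'D'))
      else pvFindNext r (su + 1) sd
    else pvFindNext r su (sd + 1)

def pvNext (path : List Char) : Option (List Char) := pvFindNext path.reverse 0 0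

-- Source B's 'while path is not None' loop; the Nat fuel is a totality guard only
def pvBLoop : Nat → Option (List Char) → List String
  | 0, _ => []
  | _ + 1, none => []
  | fuel + 1, some path =>
    -- ''.join(path); the return_type == "list" branch is excluded by Pre_generate
    String.ofList path :: pvBLoop fuel (pvNext path)

def generate_alt (n : Int) (return_type : String) : List String :=
  if n < 0 then []
  else pvBLoop (3 ^ (2 * n).toNat + 1)
    (some (List.replicate n.toNat 'U' ++ List.replicate n.toNat 'D'))

-- ===== PRECONDITION & SPEC =====
-- Pre_ excludes return_type = "list": there A returns (yields) lists of characters,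
-- which are not values of the declared result type List String.
def Pre_generate (n : Int) (return_type : String) : Prop := return_type ≠ "list"
instance (n : Int) (return_type : String) : Decidable (Pre_generate n return_type) := by
  unfold Pre_generate; infer_instance

def pvWitness_generate : Int × String := (2, "str")

def Spec_generate (n : Int) (return_type : String) (out : List String) : Prop :=
  out = generate_alt n return_type
instance (n : Int) (return_type : String) (out : List String) :
    Decidable (Spec_generate n return_type out) := by unfold Spec_generate; infer_instance

-- ===== CLAIM (what is proved, stated in full; the proofs are below) =====
def Claim_equal_generate : Prop := ∀ (n : Int) (return_type : String),
  Dom_generate n return_type → Pre_generate n return_type →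
  Spec_generate n return_type (generate n return_type)

-- ===== LEMMAS AND PROOFS =====
theorem pvMS_lt_cons (n l h u : Int) (p : String) (rest : List (Int × Int × Int × String)) :
    pvMS n rest < pvMS n ((l, h, u, p) :: rest) := by
  simp only [pvMS, List.map_cons, List.sum_cons, pvM]
  have : 0 < 3 ^ pvExp n h u := pow_pos (by norm_num : (0:ℕ) < 3) _
  omega

theorem pv_two_pow_lt (e : Nat) (he : 1 ≤ e) (x y : Nat)
    (hx : x ≤ 3 ^ (e - 1)) (hy : y ≤ 3 ^ (e - 1)) : x + y < 3 ^ e := by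
  have h3 : 3 ^ (e - 1) * 3 = 3 ^ e := by
    rw [← pow_succ]; congr 1; omega
  have hp : 1 ≤ 3 ^ (e - 1) := Nat.one_le_pow _ _ (by norm_num)
  omega

theorem pvMS_push_lt (n l h u : Int) (p : String) (pU pD : String)
    (rest : List (Int × Int × Int × String)) :
    pvMS n ((if u < n then [(l + 1, h + 1, u + 1, pU)] else []) ++
            (if h > 0 then [(l + 1, h - 1, u, pD)] else []) ++ rest)
      < pvMS n ((l, h, u, p) :: rest) := by
  simp only [pvMS, List.map_append, List.sum_append, List.map_cons, List.sum_cons, pvM]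
  split_ifs with hU hD hD
  · simp only [List.map_cons, List.map_nil, List.sum_cons, List.sum_nil, pvM]
    have he : 1 ≤ pvExp n h u := by unfold pvExp; omega
    have heU : pvExp n (h + 1) (u + 1) ≤ pvExp n h u - 1 := by unfold pvExp; omega
    have heD : pvExp n (h - 1) u ≤ pvExp n h u - 1 := by unfold pvExp; omega
    have := pv_two_pow_lt (pvExp n h u) he (3 ^ pvExp n (h + 1) (u + 1)) (3 ^ pvExp n (h - 1) u)
      (Nat.pow_le_pow_right (by norm_num) heU) (Nat.pow_le_pow_right (by norm_num) heD)
    omega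
  · simp only [List.map_cons, List.map_nil, List.sum_cons, List.sum_nil, pvM]
    have he : 1 ≤ pvExp n h u := by unfold pvExp; omega
    have heU : pvExp n (h + 1) (u + 1) ≤ pvExp n h u - 1 := by unfold pvExp; omega
    have := pv_two_pow_lt (pvExp n h u) he (3 ^ pvExp n (h + 1) (u + 1)) 0
      (Nat.pow_le_pow_right (by norm_num) heU) (Nat.zero_le _)
    omega
  · simp only [List.map_cons, List.map_nil, List.sum_cons, List.sum_nil, pvM]
    have he : 1 ≤ pvExp n h u := by unfold pvExp; omega
    have heD : pvExp n (h - 1) u ≤ pvExp n h u - 1 := by unfold pvExp; omega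
    have := pv_two_pow_lt (pvExp n h u) he 0 (3 ^ pvExp n (h - 1) u)
      (Nat.zero_le _) (Nat.pow_le_pow_right (by norm_num) heD)
    omega
  · simp only [List.map_nil, List.sum_nil]
    have : 0 < 3 ^ pvExp n h u := pow_pos (by norm_num : (0:ℕ) < 3) _
    omega

-- proof-side DFS yield function: the leaves A yields from one stack state, given enough fuel
def pvRec (n : Int) :
    Nat → Int → Int → Int → String → List String
  | 0, length, _, _, path =>
    if length == 2 * n then [path] else []
  | fuel + 1, length, height, up, path =>
    if length == 2 * n then [path]
    else
      (if up < n then pvRec n fuel (length + 1) (height + 1) (up + 1) (path ++ "U")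
       else []) ++
      (if height > 0 then pvRec n fuel (length + 1) (height - 1) up (path ++ "D")
       else [])

-- pvRec is fuel-irrelevant once the fuel dominates pvExp
theorem pvRec_congr (n : Int) :
    ∀ (f f' : Nat) (l h u : Int) (p : String),
      pvExp n h u ≤ f → pvExp n h u ≤ f' →
      pvRec n f l h u p = pvRec n f' l h u p := by
  intro f
  induction f with
  | zero =>
    intro f' l h u p hf hf'
    have hU : ¬ u < n := by
      intro hu; have : 2 ≤ pvExp n h u := by unfold pvExp; omega
      omega
    have hD : ¬ h > 0 := by
      intro hh; have : 1 ≤ pvExp n h u := by unfold pvExp; omega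
      omega
    cases f' with
    | zero => rfl
    | succ f'' => rw [pvRec, pvRec]; simp [hU, hD]
  | succ f ih =>
    intro f' l h u p hf hf'
    cases f' with
    | zero =>
      have hU : ¬ u < n := by
        intro hu; have : 2 ≤ pvExp n h u := by unfold pvExp; omega
        omega
      have hD : ¬ h > 0 := by
        intro hh; have : 1 ≤ pvExp n h u := by unfold pvExp; omega
        omega
      rw [pvRec, pvRec]; simp [hU, hD]
    | succ f'' =>
      rw [pvRec, pvRec]
      by_cases hl : l == 2 * n
      · simp [hl]
      · rw [if_neg hl, if_neg hl]
        by_cases hU : u < n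
        · have hcU : pvExp n (h + 1) (u + 1) ≤ pvExp n h u - 1 := by unfold pvExp; omega
          have he : 2 ≤ pvExp n h u := by unfold pvExp; omega
          simp only [hU, if_true]
          rw [ih f'' _ _ _ _ (by omega) (by omega)]
          by_cases hD : h > 0
          · have hcD : pvExp n (h - 1) u ≤ pvExp n h u - 1 := by unfold pvExp; omega
            simp only [hD, if_true]
            rw [ih f'' _ _ _ _ (by omega) (by omega)]
          · simp [hD]
        · by_cases hD : h > 0
          · have hcD : pvExp n (h - 1) u ≤ pvExp n h u - 1 := by unfold pvExp; omega
            have he : 1 ≤ pvExp n h u := by unfold pvExp; omega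
            simp only [hU, if_false, hD, if_true]
            rw [ih f'' _ _ _ _ (by omega) (by omega)]
          · simp [hU, hD]

-- the stack loop, given enough fuel, is the concatenation (in order) of the DFS outputs
theorem pvLoopA_eq (n : Int) (rt : String) :
    ∀ (fuel : Nat) (stack : List (Int × Int × Int × String)),
      pvMS n stack ≤ fuel →
      pvLoopA n rt fuel stack
        = stack.flatMap
            (fun st => pvRec n (pvExp n st.2.1 st.2.2.1) st.1 st.2.1 st.2.2.1 st.2.2.2) := by
  intro fuel
  induction fuel with
  | zero =>
    intro stack hle
    match stack with
    | [] => rfl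
    | (l, h, u, p) :: rest =>
      exfalso
      have h1 := pvMS_lt_cons n l h u p rest
      omega
  | succ fuel ih =>
    intro stack hle
    match stack with
    | [] => rfl
    | (l, h, u, p) :: rest =>
      rw [pvLoopA]
      by_cases hl : l == 2 * n
      · rw [if_pos hl]
        have hrest : pvMS n rest ≤ fuel := by
          have := pvMS_lt_cons n l h u p rest; omega
        rw [ih rest hrest]
        have hhd : pvRec n (pvExp n h u) l h u p = [p] := by
          cases hpe : pvExp n h u with
          | zero => rw [pvRec]; simp [hl]
          | succ e => rw [pvRec]; simp [hl]
        simp [hhd]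
      · rw [if_neg hl]
        have hlt := pvMS_push_lt n l h u p (p ++ "U") (p ++ "D") rest
        rw [ih _ (by omega)]
        simp only [List.flatMap_cons, List.flatMap_append]
        by_cases hU : u < n
        · have he : 2 ≤ pvExp n h u := by unfold pvExp; omega
          obtain ⟨e, hee⟩ : ∃ e, pvExp n h u = e + 1 := ⟨pvExp n h u - 1, by omega⟩
          rw [hee, pvRec, if_neg hl]
          rw [pvRec_congr n e (pvExp n (h + 1) (u + 1)) _ _ _ _
            (by unfold pvExp at hee ⊢; omega) le_rfl]
          by_cases hD : h > 0
          · rw [pvRec_congr n e (pvExp n (h - 1) u) _ _ _ _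
              (by unfold pvExp at hee ⊢; omega) le_rfl]
            simp [hU, hD]
          · simp [hU, hD]
        · by_cases hD : h > 0
          · have he : 1 ≤ pvExp n h u := by unfold pvExp; omega
            obtain ⟨e, hee⟩ : ∃ e, pvExp n h u = e + 1 := ⟨pvExp n h u - 1, by omega⟩
            rw [hee, pvRec, if_neg hl]
            rw [pvRec_congr n e (pvExp n (h - 1) u) _ _ _ _
              (by unfold pvExp at hee ⊢; omega) le_rfl]
            simp [hU, hD]
          · have hz : pvRec n (pvExp n h u) l h u p = [] := by
              cases hpe : pvExp n h u with
              | zero => rw [pvRec]; simp [hl]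
              | succ e => rw [pvRec]; simp [hl, hU, hD]
            simp [hU, hD, hz]

-- the same DFS over List Char paths (bridges port A's String paths to the scan lemmas)
def pvRecL (n : Int) :
    Nat → Int → Int → Int → List Char → List (List Char)
  | 0, length, _, _, p =>
    if length == 2 * n then [p] else []
  | fuel + 1, length, height, up, p =>
    if length == 2 * n then [p]
    else
      (if up < n then pvRecL n fuel (length + 1) (height + 1) (up + 1) (p ++ ['U'])
       else []) ++
      (if height > 0 then pvRecL n fuel (length + 1) (height - 1) up (p ++ ['D'])
       else [])

theorem pvRec_eq_recL (n : Int) :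
    ∀ (f : Nat) (l h u : Int) (s : String),
      pvRec n f l h u s = (pvRecL n f l h u s.toList).map String.ofList := by
  intro f
  induction f with
  | zero =>
    intro l h u s
    rw [pvRec, pvRecL]
    by_cases hl : l == 2 * n <;> simp [hl]
  | succ f ih =>
    intro l h u s
    rw [pvRec, pvRecL]
    by_cases hl : l == 2 * n
    · simp [hl]
    · rw [if_neg hl, if_neg hl]
      rw [ih _ _ _ (s ++ "U"), ih _ _ _ (s ++ "D")]
      have hu : (s ++ "U").toList = s.toList ++ ['U'] := by simp
      have hd : (s ++ "D").toList = s.toList ++ ['D'] := by simp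
      rw [hu, hd]
      by_cases hU : u < n <;> by_cases hD : h > 0 <;> simp [hU, hD]

theorem pvRecL_len (n : Int) :
    ∀ (f : Nat) (l h u : Int) (p : List Char),
      (pvRecL n f l h u p).length ≤ 3 ^ f := by
  intro f
  induction f with
  | zero =>
    intro l h u p
    rw [pvRecL]
    by_cases hl : l == 2 * n <;> simp [hl]
  | succ f ih =>
    intro l h u p
    rw [pvRecL]
    have h3 : 3 ^ f + 3 ^ f ≤ 3 ^ (f + 1) := by
      have : 1 ≤ 3 ^ f := Nat.one_le_pow _ _ (by norm_num)
      rw [pow_succ]; omega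
    have hp : 1 ≤ 3 ^ (f + 1) := Nat.one_le_pow _ _ (by norm_num)
    by_cases hl : l == 2 * n
    · simp [hl]; omega
    · rw [if_neg hl]
      by_cases hU : u < n <;> by_cases hD : h > 0 <;>
        simp only [hU, hD, if_true, if_false, List.length_append, List.length_nil] <;>
        [skip; skip; skip; omega] <;>
      · have h1 := ih (l + 1) (h + 1) (u + 1) (p ++ ['U'])
        have h2 := ih (l + 1) (h - 1) u (p ++ ['D'])
        omega

-- ===== scan lemmas for the successor function =====
theorem pvScan_repD (k : Nat) :
    ∀ (r : List Char) (su sd : Nat),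
      pvFindNext (List.replicate k 'D' ++ r) su sd = pvFindNext r su (sd + k) := by
  induction k with
  | zero => intro r su sd; simp
  | succ k ih =>
    intro r su sd
    rw [List.replicate_succ, List.cons_append, pvFindNext]
    have : ('D' == 'U') = false := by decide
    rw [this]
    simp only [Bool.false_eq_true, if_false]
    rw [ih]
    congr 1
    omega

theorem pv_blocks_snoc (x : List Char) :
    ∀ (a : Nat), (List.replicate (a + 1) x).flatten = (List.replicate a x).flatten ++ x
  | 0 => by simp
  | a + 1 => by
    calc (List.replicate (a + 2) x).flatten
        = x ++ (List.replicate (a + 1) x).flatten := by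
          rw [List.replicate_succ, List.flatten_cons]
      _ = x ++ ((List.replicate a x).flatten ++ x) := by rw [pv_blocks_snoc x a]
      _ = (x ++ (List.replicate a x).flatten) ++ x := by rw [List.append_assoc]
      _ = (List.replicate (a + 1) x).flatten ++ x := by
          rw [List.replicate_succ, List.flatten_cons]

theorem pv_rev_blocks (a : Nat) :
    ((List.replicate a (['U', 'D'] : List Char)).flatten).reverse
      = (List.replicate a (['D', 'U'] : List Char)).flatten := by
  induction a with
  | zero => simp
  | succ a ih =>
    rw [List.replicate_succ, List.flatten_cons, List.reverse_append, ih]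
    rw [pv_blocks_snoc ['D','U'] a]
    simp

theorem pvScan_blocks (a : Nat) :
    ∀ (r : List Char) (s : Nat),
      pvFindNext ((List.replicate a (['D', 'U'] : List Char)).flatten ++ r) s s
        = pvFindNext r (s + a) (s + a) := by
  induction a with
  | zero => intro r s; simp
  | succ a ih =>
    intro r s
    rw [List.replicate_succ, List.flatten_cons]
    show pvFindNext ('D' :: 'U' :: ((List.replicate a (['D','U'] : List Char)).flatten ++ r)) s s = _
    rw [pvFindNext]
    have hD : ('D' == 'U') = false := by decide
    rw [hD]
    simp only [Bool.false_eq_true, if_false]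
    rw [pvFindNext]
    have hUU : ('U' == 'U') = true := by decide
    rw [hUU]
    simp only [if_true]
    have hcond : ¬ (s + 2 ≤ s + 1) := by omega
    rw [if_neg hcond, ih]
    congr 1 <;> omega

-- successor of the lex-largest completion p ++ D^h ++ (UD)^a: the scan falls through the
-- whole suffix and continues into p with counters (a, a + h)
theorem pvNext_last (p : List Char) (hN a : Nat) :
    pvNext (p ++ List.replicate hN 'D' ++ (List.replicate a (['U', 'D'] : List Char)).flatten)
      = pvFindNext p.reverse a (a + hN) := by
  unfold pvNext
  rw [List.reverse_append, List.reverse_append, pv_rev_blocks, List.reverse_replicate]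
  rw [pvScan_blocks, pvScan_repD]
  simp

theorem pv_head?_append {α : Type} {l₁ l₂ : List α} {x : α} (h : l₁.head? = some x) :
    (l₁ ++ l₂).head? = some x := by
  cases l₁ with
  | nil => simp at h
  | cons y ys => simpa using h

theorem pv_getLast?_append {α : Type} {l₁ l₂ : List α} {x : α} (h : l₂.getLast? = some x) :
    (l₁ ++ l₂).getLast? = some x := by
  have h2 : l₂ ≠ [] := by intro e; subst e; simp at h
  rw [List.getLast?_append]
  simp [h]

-- ===== the chain theorem: the DFS yield list is the successor chain =====
theorem pvMain (n : Int) :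
    ∀ (t f : Nat) (h u : Int) (p : List Char) (a hN : Nat),
      (a : Int) = n - u → (hN : Int) = h → t = 2 * a + hN → pvExp n h u ≤ f →
      (pvRecL n f (2 * n - t) h u p ≠ [] ∧
       (pvRecL n f (2 * n - t) h u p).head?
         = some (p ++ List.replicate a 'U' ++ List.replicate (a + hN) 'D') ∧
       (pvRecL n f (2 * n - t) h u p).getLast?
         = some (p ++ List.replicate hN 'D' ++ (List.replicate a (['U', 'D'] : List Char)).flatten) ∧
       List.IsChain (fun w₁ w₂ => pvNext w₁ = some w₂) (pvRecL n f (2 * n - t) h u p)) := by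
  intro t
  induction t with
  | zero =>
    intro f h u p a hN ha hh ht hf
    have ha0 : a = 0 := by omega
    have hh0 : hN = 0 := by omega
    subst ha0; subst hh0
    have hl : ((2 * n - (0 : Nat) : Int) == 2 * n) = true := by
      simp only [Nat.cast_zero, sub_zero, beq_self_eq_true]
    have : pvRecL n f (2 * n - (0 : Nat)) h u p = [p] := by
      cases f with
      | zero => rw [pvRecL, if_pos hl]
      | succ f => rw [pvRecL, if_pos hl]
    rw [this]
    refine ⟨by simp, by simp, by simp, by simp⟩
  | succ t ih =>
    intro f h u p a hN ha hh ht hf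
    have hexp : pvExp n h u = t + 1 := by
      unfold pvExp; omega
    obtain ⟨f', rfl⟩ : ∃ f', f = f' + 1 := ⟨f - 1, by omega⟩
    have hl : ¬ ((2 * n - ((t + 1 : Nat) : Int)) == 2 * n) = true := by
      simp; omega
    rw [pvRecL, if_neg hl]
    have harg : (2 * n - ((t + 1 : Nat) : Int) + 1) = 2 * n - (t : Nat) := by
      push_cast; ring
    rw [harg]
    have hf' : pvExp n h u - 1 ≤ f' := by omega
    cases a with
    | zero =>
      cases hN with
      | zero => exact absurd ht (by omega)
      | succ hN' =>
        -- only the D-child (a = 0, so no U-child)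
        have hU : ¬ u < n := by omega
        have hD : h > 0 := by omega
        have hIH := ih f' (h - 1) u (p ++ ['D']) 0 hN'
          (by omega) (by omega) (by omega) (by unfold pvExp; omega)
        obtain ⟨hne, hhead, hlast, hchain⟩ := hIH
        simp only [hU, hD, if_true, if_false, List.nil_append]
        refine ⟨hne, ?_, ?_, hchain⟩
        · rw [hhead]
          simp [List.replicate_succ, List.append_assoc]
        · rw [hlast]
          simp [List.replicate_succ, List.append_assoc]
    | succ a' =>
      cases hN with
      | zero =>
       -- only the U-child (h = 0, so no D-child)
       have hU : u < n := by omega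
       have hD : ¬ h > 0 := by omega
       have hIH := ih f' (h + 1) (u + 1) (p ++ ['U']) a' 1
         (by omega) (by omega) (by omega) (by unfold pvExp; omega)
       obtain ⟨hne, hhead, hlast, hchain⟩ := hIH
       simp only [hU, hD, if_true, if_false, List.append_nil]
       refine ⟨hne, ?_, ?_, hchain⟩
       · rw [hhead]
         simp [List.replicate_succ, List.append_assoc]
       · rw [hlast]
         simp [List.replicate_succ, List.append_assoc]
      | succ hN' =>
       -- both children: U-subtree then D-subtree
       have hU : u < n := by omega
       have hD : h > 0 := by omega
       have hIHU := ih f' (h + 1) (u + 1) (p ++ ['U']) a' (hN' + 2)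
         (by omega) (by omega) (by omega) (by unfold pvExp; omega)
       have hIHD := ih f' (h - 1) u (p ++ ['D']) (a' + 1) hN'
         (by omega) (by omega) (by omega) (by unfold pvExp; omega)
       obtain ⟨hneU, hheadU, hlastU, hchainU⟩ := hIHU
       obtain ⟨hneD, hheadD, hlastD, hchainD⟩ := hIHD
       simp only [hU, hD, if_true]
       have hlink : ∀ x ∈ (pvRecL n f' (2 * n - (t : Nat)) (h + 1) (u + 1) (p ++ ['U'])).getLast?,
           ∀ y ∈ (pvRecL n f' (2 * n - (t : Nat)) (h - 1) u (p ++ ['D'])).head?,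
           pvNext x = some y := by
         intro x hx y hy
         rw [hlastU] at hx
         rw [hheadD] at hy
         simp only [Option.mem_def, Option.some.injEq] at hx hy
         subst hx; subst hy
         rw [pvNext_last (p ++ ['U']) (hN' + 2) a']
         rw [List.reverse_append]
         show pvFindNext ('U' :: p.reverse) a' (a' + (hN' + 2)) = _
         rw [pvFindNext]
         have hUU : ('U' == 'U') = true := by decide
         rw [hUU]
         simp only [if_true]
         have hcond : a' + 2 ≤ a' + (hN' + 2) := by omega
         rw [if_pos hcond]
         rw [List.reverse_reverse]
         simp only [Option.some.injEq]
         have harith : a' + (hN' + 2) - 1 = (a' + 1) + hN' := by omega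
         rw [harith]
         simp [List.replicate_succ, List.append_assoc]
       refine ⟨by simp [hneU], ?_, ?_, ?_⟩
       · rw [pv_head?_append hheadU]
         have harith : a' + (hN' + 2) = (a' + 1) + (hN' + 1) := by omega
         rw [harith]
         simp [List.replicate_succ, List.append_assoc]
       · rw [pv_getLast?_append hlastD]
         simp [List.replicate_succ, List.append_assoc]
       · exact List.IsChain.append hchainU hchainD hlink

-- unfolding Source B's while-loop along a successor chain
theorem pvBLoop_eq :
    ∀ (L : List (List Char)) (fuel : Nat) (w : List Char),
      L.head? = some w →
      List.IsChain (fun w₁ w₂ => pvNext w₁ = some w₂) L →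
      (∀ x, L.getLast? = some x → pvNext x = none) →
      L.length < fuel →
      pvBLoop fuel (some w) = L.map String.ofList := by
  intro L
  induction L with
  | nil => intro fuel w hw; simp at hw
  | cons y ys ih =>
    intro fuel w hw hchain hlastn hlen
    simp only [List.head?_cons, Option.some.injEq] at hw
    subst hw
    obtain ⟨f', rfl⟩ : ∃ f', fuel = f' + 1 := ⟨fuel - 1, by omega⟩
    rw [pvBLoop]
    cases ys with
    | nil =>
      have hnone : pvNext y = none := hlastn y (by simp)
      rw [hnone]
      cases f' with
      | zero => rfl
      | succ f'' => rfl
    | cons z zs =>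
      have hnext : pvNext y = some z := (List.isChain_cons_cons.mp hchain).1
      rw [hnext]
      rw [ih f' z rfl (List.isChain_cons_cons.mp hchain).2
        (by intro x hx; exact hlastn x (by rw [← hx]; simp))
        (by simp at hlen ⊢; omega)]
      simp

-- ===== VERDICT (by name: the statement is the Claim_ definition above) =====
theorem generate_spec : Claim_equal_generate := by
  intro n rt _ _
  unfold Spec_generate generate generate_alt
  rw [pvLoopA_eq n rt _ _ le_rfl]
  simp only [List.flatMap_cons, List.flatMap_nil, List.append_nil]
  rw [pvRec_eq_recL]
  by_cases hn : 0 ≤ n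
  · rw [if_neg (by omega : ¬ n < 0)]
    have ha : ((n.toNat : Int)) = n - 0 := by omega
    have hexp : pvExp n 0 0 = 2 * n.toNat + 0 := by unfold pvExp; omega
    have hl0 : ("" : String).toList = [] := by simp
    have harg : (0 : Int) = 2 * n - ((2 * n.toNat + 0 : Nat) : Int) := by push_cast; omega
    have hmain := pvMain n (2 * n.toNat + 0) (pvExp n 0 0) 0 0 [] n.toNat 0
      ha (by simp) rfl (by omega)
    obtain ⟨hne, hhead, hlast, hchain⟩ := hmain
    rw [hl0]
    have hrw : pvRecL n (pvExp n 0 0) 0 0 0 []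
        = pvRecL n (pvExp n 0 0) (2 * n - ((2 * n.toNat + 0 : Nat) : Int)) 0 0 [] := by
      rw [← harg]
    rw [hrw]
    rw [pvBLoop_eq (pvRecL n (pvExp n 0 0) (2 * n - ((2 * n.toNat + 0 : Nat) : Int)) 0 0 [])
      (3 ^ (2 * n).toNat + 1) (List.replicate n.toNat 'U' ++ List.replicate n.toNat 'D')
      ?_ hchain ?_ ?_]
    · rw [hhead]
      simp
    · intro x hx
      rw [hlast] at hx
      simp only [Option.some.injEq] at hx
      subst hx
      rw [show ([] ++ List.replicate 0 'D' ++ (List.replicate n.toNat (['U','D'] : List Char)).flatten)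
          = ([] : List Char) ++ List.replicate 0 'D' ++ (List.replicate n.toNat (['U','D'] : List Char)).flatten from rfl]
      rw [pvNext_last [] 0 n.toNat]
      rfl
    · have hb := pvRecL_len n (pvExp n 0 0) (2 * n - ((2 * n.toNat + 0 : Nat) : Int)) 0 0 []
      rw [hexp]
      rw [hexp] at hb
      simp only [Nat.add_zero] at hb ⊢
      have h23 : (2 * n).toNat = 2 * n.toNat := by omega
      rw [h23]
      omega
  · rw [if_pos (by omega : n < 0)]
    have hexp : pvExp n 0 0 = 0 := by unfold pvExp; omega
    rw [hexp, pvRecL]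
    have hl : ((0 : Int) == 2 * n) = false := by simp; omega
    rw [hl]
    simp
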